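-- pv_equiv track=rewrite | github.com/AbductiveLearning/ABLkit | examples/hwf/main.py | _valid_candidate
-- ===== SOURCE A (Python) =====
-- def _valid_candidate(formula):
--     if len(formula) % 2 == 0:
--         return False
--     for i in range(len(formula)):
--         if i % 2 == 0 and formula[i] not in ["1", "2", "3", "4", "5", "6", "7", "8", "9"]:
--             return False
--         if i % 2 != 0 and formula[i] not in ["+", "-", "*", "/"]:
--             return False
--     return True
-- ===== SOURCE B (Python) =====
-- DIGITS = {"1", "2", "3", "4", "5", "6", "7", "8", "9"}
-- OPS = {"+", "-", "*", "/"}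
--
--
-- def _valid_candidate(formula):
--     if len(formula) % 2 == 0:
--         return False
--     return all(t in DIGITS for t in formula[0::2]) and all(
--         t in OPS for t in formula[1::2]
--     )
-- ===== Notes on version B (the rewrite author's own statement) =====
-- stated objective: simpler
-- what changed: Replaces the per-index parity-branching loop with an odd-length guard plus two homogeneous slices (formula[0::2], formula[1::2]) checked wholesale against the digit and operator sets.
import Mathlib
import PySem

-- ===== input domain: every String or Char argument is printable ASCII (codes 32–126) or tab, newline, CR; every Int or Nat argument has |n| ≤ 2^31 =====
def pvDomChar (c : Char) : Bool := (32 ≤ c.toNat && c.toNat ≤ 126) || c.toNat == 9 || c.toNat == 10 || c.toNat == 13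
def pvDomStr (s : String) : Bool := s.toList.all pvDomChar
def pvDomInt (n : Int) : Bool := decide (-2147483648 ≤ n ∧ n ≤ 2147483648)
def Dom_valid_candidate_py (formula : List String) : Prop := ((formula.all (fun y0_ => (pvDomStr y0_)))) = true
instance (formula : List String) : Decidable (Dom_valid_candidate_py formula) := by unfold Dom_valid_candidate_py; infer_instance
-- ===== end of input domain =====

-- B replaces A's per-index parity-branching loop with an odd-length guard plus two
-- step-2 slices checked wholesale against the digit/operator sets (objective: simpler).


-- ===== PORT A =====
-- the 'for i in range(len(formula))' loop with its two early returns, recursing on the index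
def validCandidateLoop (formula : List String) (i : Nat) : Bool :=
  if h : i < formula.length then
    if i % 2 == 0 && !(decide (formula[i] ∈ ["1", "2", "3", "4", "5", "6", "7", "8", "9"])) then
      false
    else if i % 2 != 0 && !(decide (formula[i] ∈ ["+", "-", "*", "/"])) then
      false
    else
      validCandidateLoop formula (i + 1)
  else
    true
termination_by formula.length - i

def valid_candidate_py (formula : List String) : Bool :=
  if formula.length % 2 == 0 then false
  else validCandidateLoop formula 0

-- ===== PORT B =====
-- formula[0::2] and formula[1::2]: hand-ported step-2 slices (PySem.List.slice has no step);
-- exact for non-negative start and step 2 on any list.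
def pvEverySecond (l : List String) : List String :=
  match l with
  | [] => []
  | [x] => [x]
  | x :: _ :: rest => x :: pvEverySecond rest
def pvSkipSecond (l : List String) : List String :=
  pvEverySecond (l.drop 1)

def valid_candidate_py_alt (formula : List String) : Bool :=
  if formula.length % 2 == 0 then false
  else
    (pvEverySecond formula).all (fun t => decide (t ∈ ["1", "2", "3", "4", "5", "6", "7", "8", "9"])) &&
    (pvSkipSecond formula).all (fun t => decide (t ∈ ["+", "-", "*", "/"]))

-- ===== PRECONDITION & SPEC =====
def Spec_valid_candidate_py (formula : List String) (out : Bool) : Prop := out = valid_candidate_py_alt formula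
instance (formula : List String) (out : Bool) : Decidable (Spec_valid_candidate_py formula out) := by unfold Spec_valid_candidate_py; infer_instance

-- ===== CLAIM (what is proved, stated in full; the proofs are below) =====
def Claim_equal_valid_candidate_py : Prop := ∀ (formula : List String), Dom_valid_candidate_py formula → Spec_valid_candidate_py formula (valid_candidate_py formula)

-- ===== LEMMAS AND PROOFS =====
def pvIsDigit (t : String) : Bool := decide (t ∈ ["1", "2", "3", "4", "5", "6", "7", "8", "9"])
def pvIsOp (t : String) : Bool := decide (t ∈ ["+", "-", "*", "/"])

-- A's loop from index i equals a parity-tagged scan of the remaining suffix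
def pvCheck (l : List String) (even : Bool) : Bool :=
  match l with
  | [] => true
  | x :: rest => (if even then pvIsDigit x else pvIsOp x) && pvCheck rest (!even)

theorem loop_eq_check (formula : List String) (i : Nat) :
    validCandidateLoop formula i = pvCheck (formula.drop i) (i % 2 == 0) := by
  by_cases h : i < formula.length
  · rw [validCandidateLoop]
    have hd : formula.drop i = formula[i] :: formula.drop (i + 1) :=
      List.drop_eq_getElem_cons h
    rw [hd, pvCheck]
    have ih := loop_eq_check formula (i + 1)
    by_cases hp : i % 2 = 0
    · have hp1 : (i + 1) % 2 ≠ 0 := by omega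
      simp [h, hp, ih, pvIsDigit]
      cases hdig : decide (formula[i] ∈ ["1", "2", "3", "4", "5", "6", "7", "8", "9"]) <;> simp_all
    · have hp1 : (i + 1) % 2 = 0 := by omega
      simp [h, hp, hp1, ih, pvIsOp]
      cases hop : decide (formula[i] ∈ ["+", "-", "*", "/"]) <;> simp_all
  · rw [validCandidateLoop]
    simp [h, List.drop_eq_nil_of_le (by omega : formula.length ≤ i), pvCheck]
termination_by formula.length - i

theorem everySecond_cons (x : String) (rest : List String) :
    pvEverySecond (x :: rest) = x :: pvSkipSecond rest := by
  cases rest <;> rfl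

theorem skipSecond_cons (x : String) (rest : List String) :
    pvSkipSecond (x :: rest) = pvEverySecond rest := rfl

theorem check_eq_slices (l : List String) :
    (pvCheck l true = ((pvEverySecond l).all pvIsDigit && (pvSkipSecond l).all pvIsOp)) ∧
    (pvCheck l false = ((pvEverySecond l).all pvIsOp && (pvSkipSecond l).all pvIsDigit)) := by
  induction l with
  | nil => simp [pvCheck, pvEverySecond, pvSkipSecond]
  | cons x rest ih =>
    constructor
    · simp [pvCheck, everySecond_cons, skipSecond_cons, ih.2]
      cases pvIsDigit x <;> simp [Bool.and_comm]
    · simp [pvCheck, everySecond_cons, skipSecond_cons, ih.1]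
      cases pvIsOp x <;> simp [Bool.and_comm]

-- ===== VERDICT (by name: the statement is the Claim_ definition above) =====
theorem valid_candidate_py_spec : Claim_equal_valid_candidate_py := by
  intro formula _
  unfold Spec_valid_candidate_py valid_candidate_py valid_candidate_py_alt
  by_cases h : formula.length % 2 = 0
  · simp [h]
  · have h2 : (formula.length % 2 == 0) = false := by simp [h]
    rw [h2]
    simp only [Bool.false_eq_true, if_false]
    rw [loop_eq_check]
    exact (check_eq_slices formula).1
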